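-- pv_equiv track=rewrite | github.com/nevmenandr/duathlon | code/generate_game.py | catch_pieces
-- ===== SOURCE A (Python) =====
-- PIECES = {
--     "r": "♜b",
--     "n": "♞b",
--     "b": "♗b",
--     "q": "♛b",
--     "k": "♚b",
--     "p": "♙b",
--     "R": "♜w",
--     "N": "♞w",
--     "B": "♗w",
--     "Q": "♛w",
--     "K": "♚w",
--     "P": "♙w",
-- }
--
-- def catch_pieces(board):
--     picture = []
--     board = str(board)
--     board = board.replace(" ", "")
--     board = board.replace("\n", "")
--     for (i, cell) in enumerate(board):
--         if cell not in PIECES: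
--             continue
--         line = i // 8  # + 1
--         row = i - line * 8
--         picture.append((PIECES[cell], line, row))
--     return picture
-- ===== SOURCE B (Python) =====
-- PIECES = {
--     "r": "♜b",
--     "n": "♞b",
--     "b": "♗b",
--     "q": "♛b",
--     "k": "♚b",
--     "p": "♙b",
--     "R": "♜w",
--     "N": "♞w",
--     "B": "♗w",
--     "Q": "♛w",
--     "K": "♚w",
--     "P": "♙w",
-- }
--
-- def catch_pieces(board):
--     board = str(board)
--     board = board.replace(" ", "").replace("\n", "")
--     rows = [board[k:k + 8] for k in range(0, len(board), 8)]
--     picture = []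
--     for r, chunk in enumerate(rows):
--         for c, cell in enumerate(chunk):
--             if cell in PIECES:
--                 picture.append((PIECES[cell], r, c))
--     return picture
-- ===== Notes on version B (the rewrite author's own statement) =====
-- stated objective: alternative
-- what changed: B slices the cleaned string into 8-character rows and derives (line,row) from a nested enumerate over chunks, instead of A's flat enumerate with line = i//8 and row = i - line*8.
import Mathlib
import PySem

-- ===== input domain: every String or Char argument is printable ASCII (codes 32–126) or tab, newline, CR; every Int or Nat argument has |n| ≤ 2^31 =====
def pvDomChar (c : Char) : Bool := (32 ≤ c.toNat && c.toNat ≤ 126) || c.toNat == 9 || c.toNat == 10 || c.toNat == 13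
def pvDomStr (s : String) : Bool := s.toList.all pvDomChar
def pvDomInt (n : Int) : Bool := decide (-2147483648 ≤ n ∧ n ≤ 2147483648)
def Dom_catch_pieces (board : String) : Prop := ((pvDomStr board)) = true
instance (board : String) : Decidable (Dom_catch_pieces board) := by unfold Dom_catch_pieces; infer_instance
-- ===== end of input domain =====

-- B extracts pieces by slicing the cleaned board into 8-char rows and nested enumeration,
-- instead of A's flat enumerate with index arithmetic (alternative decomposition, same cost).

-- the module-level PIECES dict, shared context of both versions
def PIECES : PySem.Dict Char String :=
  PySem.Dict.ofList [('r', "♜b"), ('n', "♞b"), ('b', "♗b"), ('q', "♛b"), ('k', "♚b"), ('p', "♙b"),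
   ('R', "♜w"), ('N', "♞w"), ('B', "♗w"), ('Q', "♛w"), ('K', "♚w"), ('P', "♙w")]

-- board.replace(" ", "").replace("\n", "") — identical first lines of both Pythons
def pvClean (board : String) : String :=
  PySem.Str.replace (PySem.Str.replace board " " "") "\n" ""

-- ===== PORT A =====
-- the 'for (i, cell) in enumerate(board)' loop, i the running enumerate index
def pvALoop (cs : List Char) (i : Nat) (acc : List (String × Int × Int)) :
    List (String × Int × Int) :=
  match cs with
  | [] => acc
  | cell :: rest =>
    match (PIECES.get? cell) with
    | none => pvALoop rest (i + 1) acc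
    | some v =>
      let line : Int := PySem.Int.floordiv (i : Int) 8
      pvALoop rest (i + 1) (acc ++ [(v, line, (i : Int) - line * 8)])

def catch_pieces (board : String) : List (String × Int × Int) :=
  pvALoop (pvClean board).toList 0 []

-- ===== PORT B =====
-- rows = [board[k:k+8] for k in range(0, len(board), 8)]  (successive 8-char slices)
def pvBRows (cs : List Char) : List (List Char) :=
  if cs = [] then [] else cs.take 8 :: pvBRows (cs.drop 8)
termination_by cs.length
decreasing_by
  simp only [List.length_drop]
  have : cs.length ≠ 0 := by simpa [List.length_eq_zero_iff] using ‹¬ cs = []›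
  omega

-- inner 'for c, cell in enumerate(chunk)'
def pvBCells (chunk : List Char) (r c : Nat) (acc : List (String × Int × Int)) :
    List (String × Int × Int) :=
  match chunk with
  | [] => acc
  | cell :: rest =>
    match (PIECES.get? cell) with
    | none => pvBCells rest r (c + 1) acc
    | some v => pvBCells rest r (c + 1) (acc ++ [(v, (r : Int), (c : Int))])

-- outer 'for r, chunk in enumerate(rows)'
def pvBOuter (rows : List (List Char)) (r : Nat) (acc : List (String × Int × Int)) :
    List (String × Int × Int) :=
  match rows with
  | [] => acc
  | chunk :: rest => pvBOuter rest (r + 1) (pvBCells chunk r 0 acc)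

def catch_pieces_alt (board : String) : List (String × Int × Int) :=
  pvBOuter (pvBRows (pvClean board).toList) 0 []

-- ===== PRECONDITION & SPEC =====
def Spec_catch_pieces (board : String) (out : List (String × Int × Int)) : Prop := out = catch_pieces_alt board
instance (board : String) (out : List (String × Int × Int)) : Decidable (Spec_catch_pieces board out) := by unfold Spec_catch_pieces; infer_instance

-- ===== CLAIM (what is proved, stated in full; the proofs are below) =====
def Claim_equal_catch_pieces : Prop := ∀ (board : String), Dom_catch_pieces board → Spec_catch_pieces board (catch_pieces board)

-- ===== LEMMAS AND PROOFS =====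

-- inside one 8-char chunk the flat index 8*r+c yields line r, row c
lemma pvALoop_chunk (chunk : List Char) : ∀ (rest : List Char) (r c : Nat)
    (acc : List (String × Int × Int)), c + chunk.length ≤ 8 →
    pvALoop (chunk ++ rest) (8 * r + c) acc
      = pvALoop rest (8 * r + c + chunk.length) (pvBCells chunk r c acc) := by
  induction chunk with
  | nil => intro rest r c acc _; simp [pvBCells]
  | cons cell rest' ih =>
    intro rest r c acc hle
    have hlen' : c + 1 + rest'.length ≤ 8 := by simp [List.length_cons] at hle; omega
    have hline : PySem.Int.floordiv ((8 * r + c : Nat) : Int) 8 = (r : Int) := by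
      rw [PySem.Int.floordiv_eq_iff_of_pos (by omega)]
      push_cast; omega
    have hrow : ((8 * r + c : Nat) : Int) - (r : Int) * 8 = (c : Int) := by push_cast; omega
    have hidx : 8 * r + c + 1 = 8 * r + (c + 1) := by omega
    have hidx2 : 8 * r + (c + 1) + rest'.length = 8 * r + c + (cell :: rest').length := by
      simp only [List.length_cons]; omega
    simp only [List.cons_append, pvALoop, pvBCells]
    cases PIECES.get? cell with
    | none => rw [hidx, ih rest r (c + 1) acc hlen', hidx2]
    | some v =>
      simp only [hline, hrow]
      rw [hidx, ih rest r (c + 1) _ hlen', hidx2]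

lemma pvALoop_eq_pvBOuter : ∀ (n : Nat) (cs : List Char), cs.length ≤ n →
    ∀ (r : Nat) (acc : List (String × Int × Int)),
    pvALoop cs (8 * r) acc = pvBOuter (pvBRows cs) r acc := by
  intro n
  induction n with
  | zero =>
    intro cs h r acc
    have : cs = [] := by simpa [List.length_eq_zero_iff] using Nat.le_zero.mp h
    subst this; simp [pvBRows, pvALoop, pvBOuter]
  | succ n ih =>
    intro cs h r acc
    by_cases hcs : cs = []
    · subst hcs; simp [pvBRows, pvALoop, pvBOuter]
    · rw [pvBRows]; simp only [hcs, if_false, pvBOuter]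
      have hceq : cs = cs.take 8 ++ cs.drop 8 := (List.take_append_drop 8 cs).symm
      have hsplit := pvALoop_chunk (cs.take 8) (cs.drop 8) r 0 acc
        (by simp [List.length_take])
      simp only [Nat.add_zero] at hsplit
      conv_lhs => rw [hceq]
      rw [hsplit]
      by_cases hlen : cs.length ≤ 8
      · have hd : cs.drop 8 = [] := by rw [List.drop_eq_nil_iff]; omega
        rw [hd]; simp [pvALoop, pvBRows, pvBOuter]
      · have htake : (cs.take 8).length = 8 := by simp [List.length_take]; omega
        rw [htake, show 8 * r + 8 = 8 * (r + 1) from by omega,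
          ih (cs.drop 8) (by simp [List.length_drop]; omega) (r + 1)]

-- ===== VERDICT (by name: the statement is the Claim_ definition above) =====
theorem catch_pieces_spec : Claim_equal_catch_pieces := by
  intro board _
  unfold Spec_catch_pieces catch_pieces catch_pieces_alt
  have := pvALoop_eq_pvBOuter (pvClean board).toList.length (pvClean board).toList le_rfl 0 []
  simpa using this
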